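-- pv_equiv track=rewrite | github.com/Arsen1302/Code-copy-detector | TestData/solutions/problem_1622_5.py | solution_1622_5
-- ===== SOURCE A (Python) =====
-- def solution_1622_5(nums):
--     arr, count = [0] * len(nums), 1
--     for i in range(len(nums)):
--         if nums[i] == 0:
--             arr[i] = count
--             count += 1
--         else: count = 1
--     return sum(arr)
-- ===== SOURCE B (Python) =====
-- def solution_1622_5(nums):
--     total = 0
--     run = 0
--     for x in nums:
--         if x == 0:
--             run += 1
--         else:
--             total += run * (run + 1) // 2
--             run = 0
--     return total + run * (run + 1) // 2
-- ===== Notes on version B (the rewrite author's own statement) =====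
-- stated objective: simpler
-- what changed: B drops A's per-element auxiliary array and index loop: it scans the list once tracking only the current zero-run length and adds the closed-form triangular number L*(L+1)//2 per maximal zero run.
import Mathlib
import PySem

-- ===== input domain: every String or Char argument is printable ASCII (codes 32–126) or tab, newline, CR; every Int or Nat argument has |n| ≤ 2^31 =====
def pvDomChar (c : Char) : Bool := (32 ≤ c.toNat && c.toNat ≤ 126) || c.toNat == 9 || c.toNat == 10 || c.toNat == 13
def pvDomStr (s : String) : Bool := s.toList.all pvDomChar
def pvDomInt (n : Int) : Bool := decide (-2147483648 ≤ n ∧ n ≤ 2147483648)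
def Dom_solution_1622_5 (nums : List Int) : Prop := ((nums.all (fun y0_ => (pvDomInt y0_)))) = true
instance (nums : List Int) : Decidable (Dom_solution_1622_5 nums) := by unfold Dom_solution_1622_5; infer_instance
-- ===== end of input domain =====

-- B (simpler): no per-element auxiliary array or index loop — one scan tracking the current
-- zero-run length, adding the closed-form triangular number run*(run+1)//2 per maximal zero run.

-- ===== PORT A =====
-- literal port of A: build arr (initially zeros), write the running count at each zero, sum arr
def solution_1622_5 (nums : List Int) : Int :=
  let s := (PySem.List.pyRange 0 (nums.length : Int) 1).foldl
    (fun (s : List Int × Int) i =>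
      if PySem.List.pyGetD nums i 0 = 0 then (s.1.set i.toNat s.2, s.2 + 1)
      else (s.1, 1))
    (List.replicate nums.length 0, 1)
  s.1.sum

-- ===== PORT B =====
-- literal port of Source B: one fold carrying (total, current zero-run length)
def solution_1622_5_alt (nums : List Int) : Int :=
  let s := nums.foldl
    (fun (s : Int × Int) x =>
      if x = 0 then (s.1, s.2 + 1)
      else (s.1 + PySem.Int.floordiv (s.2 * (s.2 + 1)) 2, 0))
    ((0 : Int), (0 : Int))
  s.1 + PySem.Int.floordiv (s.2 * (s.2 + 1)) 2

-- ===== PRECONDITION & SPEC =====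
def Spec_solution_1622_5 (nums : List Int) (out : Int) : Prop := out = solution_1622_5_alt nums
instance (nums : List Int) (out : Int) : Decidable (Spec_solution_1622_5 nums out) := by unfold Spec_solution_1622_5; infer_instance

-- ===== CLAIM (what is proved, stated in full; the proofs are below) =====
def Claim_equal_solution_1622_5 : Prop := ∀ (nums : List Int), Dom_solution_1622_5 nums → Spec_solution_1622_5 nums (solution_1622_5 nums)

-- ===== LEMMAS AND PROOFS =====

-- reference function: sum of A's arr entries over the suffix, carrying A's count c
def gRun : List Int → Int → Int
  | [], _ => 0
  | h :: t, c => if h = 0 then c + gRun t (c + 1) else gRun t 1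

def triPy (r : Int) : Int := PySem.Int.floordiv (r * (r + 1)) 2

lemma triPy_succ (r : Int) : triPy (r + 1) = triPy r + (r + 1) := by
  unfold triPy
  rw [PySem.Int.floordiv_eq_ediv_of_pos (by norm_num),
      PySem.Int.floordiv_eq_ediv_of_pos (by norm_num)]
  have h : (r + 1) * (r + 1 + 1) = r * (r + 1) + 2 * (r + 1) := by ring
  rw [h]
  omega

lemma B_loop (nums : List Int) : ∀ (total run : Int),
    (let s := nums.foldl
      (fun (s : Int × Int) x =>
        if x = 0 then (s.1, s.2 + 1)
        else (s.1 + PySem.Int.floordiv (s.2 * (s.2 + 1)) 2, 0)) (total, run)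
     s.1 + PySem.Int.floordiv (s.2 * (s.2 + 1)) 2)
      = total + triPy run + gRun nums (run + 1) := by
  induction nums with
  | nil => intro total run; simp [gRun, triPy]
  | cons x t ih =>
    intro total run
    by_cases hx : x = 0
    · simp only [List.foldl_cons, hx, gRun, if_true]
      have := ih total (run + 1)
      simp only at this ⊢
      rw [this, triPy_succ]
      ring
    · simp only [List.foldl_cons, gRun, hx, if_false]
      have := ih (total + PySem.Int.floordiv (run * (run + 1)) 2) 0
      simp only at this ⊢
      rw [this]
      simp [triPy, PySem.Int.floordiv]

lemma B_eq_gRun (nums : List Int) : solution_1622_5_alt nums = gRun nums 1 := by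
  have := B_loop nums 0 0
  simp only [solution_1622_5_alt]
  simp only at this
  rw [this]
  simp [triPy, PySem.Int.floordiv]

lemma A_loop (nums : List Int) (m : Nat) : ∀ (k : Nat) (pre : List Int) (c : Int),
    nums.length - k = m → pre.length = k → k ≤ nums.length →
    ((PySem.List.pyRange (k : Int) (nums.length : Int) 1).foldl
      (fun (s : List Int × Int) i =>
        if PySem.List.pyGetD nums i 0 = 0 then (s.1.set i.toNat s.2, s.2 + 1)
        else (s.1, 1))
      (pre ++ List.replicate m 0, c)).1.sum
      = pre.sum + gRun (nums.drop k) c := by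
  induction m with
  | zero =>
    intro k pre c hm hpre hk
    have hk' : k = nums.length := by omega
    subst hk'
    rw [PySem.List.pyRange_one_eq_nil (le_refl _)]
    simp [gRun]
  | succ m ih =>
    intro k pre c hm hpre hk
    have hklt : k < nums.length := by omega
    rw [PySem.List.pyRange_one_cons (by exact_mod_cast hklt)]
    have hget : PySem.List.pyGetD nums (k : Int) 0 = nums[k] := by
      have h0 : (0:Int) ≤ (k:Int) := by omega
      have h1 : (k:Int) < (nums.length : Int) := by exact_mod_cast hklt
      rw [PySem.List.pyGetD_eq_getElem (h0 := h0) (h1 := h1)]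
      simp
    have hdrop : nums.drop k = nums[k] :: nums.drop (k + 1) :=
      (List.drop_eq_getElem_cons hklt)
    have hcast : ((k : Int) + 1) = ((k + 1 : Nat) : Int) := by push_cast; ring
    simp only [List.foldl_cons, hget]
    by_cases hv : nums[k] = 0
    · rw [if_pos hv]
      have hset : (pre ++ List.replicate (m + 1) 0).set (k : Int).toNat c
          = (pre ++ [c]) ++ List.replicate m 0 := by
        have h1 : (k : Int).toNat = pre.length := by omega
        rw [h1, List.replicate_succ]
        simp
      rw [hset, hcast]
      have := ih (k + 1) (pre ++ [c]) (c + 1) (by omega) (by simp [hpre]) (by omega)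
      rw [this, hdrop]
      simp [gRun, hv]
      ring
    · rw [if_neg hv]
      have hre : pre ++ List.replicate (m + 1) 0 = (pre ++ [(0 : Int)]) ++ List.replicate m 0 := by
        rw [List.replicate_succ]; simp
      rw [hre, hcast]
      have := ih (k + 1) (pre ++ [(0 : Int)]) 1 (by omega) (by simp [hpre]) (by omega)
      rw [this, hdrop]
      simp [gRun, hv]

lemma A_eq_gRun (nums : List Int) : solution_1622_5 nums = gRun nums 1 := by
  have := A_loop nums nums.length 0 [] 1 (by omega) rfl (by omega)
  simp only [solution_1622_5]
  simpa using this

-- ===== VERDICT (by name: the statement is the Claim_ definition above) =====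
theorem solution_1622_5_spec : Claim_equal_solution_1622_5 := by
  intro nums _
  unfold Spec_solution_1622_5
  rw [A_eq_gRun, B_eq_gRun]
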